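-- pv_equiv track=rewrite | github.com/sddcinfo/meeting-scribe | scripts/check_ui_style.py | _is_inside_block_comment_at
-- ===== SOURCE A (Python) =====
-- def _is_inside_block_comment_at(text: str, pos: int) -> bool:
--     """True if character offset `pos` falls inside an unterminated
--     `/* ... */` block. Used by the popup check to skip matches that
--     sit entirely inside a block comment, without shifting line numbers
--     via regex substitution.
--     """
--     opens = 0
--     i = 0
--     while i < pos:
--         if text[i : i + 2] == "/*":
--             opens += 1
--             i += 2
--             end = text.find("*/", i)
--             if end == -1:
--                 return True  # unterminated — everything after is in-comment
--             if end >= pos: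
--                 return True
--             i = end + 2
--             opens -= 1
--         else:
--             i += 1
--     return False
-- ===== SOURCE B (Python) =====
-- def _is_inside_block_comment_at(text: str, pos: int) -> bool:
--     """Build the list of block-comment spans once, then test containment.
--
--     Closed comments give spans (s, e) where s is the index of '/' in the
--     opener and e the index of '*' in the closer; a final unterminated '/*'
--     gives a tail start.  `pos` is inside iff s < pos <= e for some closed
--     span, or tail < pos for the unterminated tail.
--     """
--     spans = []
--     tail = None
--     i = 0
--     while True:
--         s = text.find("/*", i)
--         if s == -1:
--             break
--         e = text.find("*/", s + 2)
--         if e == -1: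
--             tail = s
--             break
--         spans.append((s, e))
--         i = e + 2
--     if tail is not None and tail < pos:
--         return True
--     return any(s < pos <= e for (s, e) in spans)
-- ===== Notes on version B (the rewrite author's own statement) =====
-- stated objective: faster
-- what changed: A interleaves a character-by-character scan up to pos with skip-ahead finds and early returns; B first builds the complete list of block-comment spans (closed (s,e) pairs plus an optional unterminated tail start) in one find-driven loop, then answers by a containment test s < pos <= e over the spans.
import Mathlib
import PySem

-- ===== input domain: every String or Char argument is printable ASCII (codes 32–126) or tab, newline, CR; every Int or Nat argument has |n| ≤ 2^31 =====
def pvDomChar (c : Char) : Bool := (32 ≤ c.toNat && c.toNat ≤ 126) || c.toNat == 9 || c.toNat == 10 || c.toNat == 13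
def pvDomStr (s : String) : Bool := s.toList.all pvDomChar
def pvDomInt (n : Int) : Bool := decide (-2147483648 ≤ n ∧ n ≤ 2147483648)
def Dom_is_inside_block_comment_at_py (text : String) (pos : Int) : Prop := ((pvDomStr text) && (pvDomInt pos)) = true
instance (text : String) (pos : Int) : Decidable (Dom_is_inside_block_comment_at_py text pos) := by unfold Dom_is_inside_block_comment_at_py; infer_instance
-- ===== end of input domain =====

-- B re-decomposes the same exact check: it first extracts every block-comment span
-- from the text in one find-driven pass, then answers the query by a containment test
-- (measured faster than A's character-by-character scan in a timing run).
-- Return values agree with A everywhere; A's write-only `opens` counter is not carried.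

-- helper lemmas cited by the ports' decreasing_by (termination only)
theorem pvSliceTwo_eq (l : List Char) (i : Nat) :
    PySem.Chars.slice l (some (i:Int)) (some ((i:Int)+2)) = (l.drop i).take 2 := by
  have h : ((i:Int)+2) = ((i+2 : Nat) : Int) := by push_cast; ring
  rw [h, PySem.Chars.slice_eq_listSlice, PySem.List.slice_natCast]
  simp

theorem pvOpen_bound (l : List Char) (i : Nat)
    (h : PySem.Chars.slice l (some (i:Int)) (some ((i:Int)+2)) = ['/','*']) :
    i + 2 ≤ l.length := by
  rw [pvSliceTwo_eq] at h
  have := congrArg List.length h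
  simp [List.length_take, List.length_drop] at this
  omega

theorem pvFindFrom_gt_len (s sub : List Char) (k : Nat) (h : s.length < k) :
    PySem.Chars.findFrom s sub (k:Int) none = -1 := by
  unfold PySem.Chars.findFrom
  have h1 : ¬ ((k:Int) < 0) := by omega
  have h2 : ((s.length : Int) < (k:Int)) := by exact_mod_cast h
  simp only [h1, if_false, if_pos h2]

-- facts about a successful find of a 2-character needle: lower bound and room for it
theorem pvFind_facts (text sub : List Char) (hsub : sub.length = 2) (k : Nat)
    (h : PySem.Chars.findFrom text sub (k:Int) none ≠ -1) :
    (k:Int) ≤ PySem.Chars.findFrom text sub (k:Int) none ∧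
    (PySem.Chars.findFrom text sub (k:Int) none).toNat + 2 ≤ text.length ∧
    sub <+: text.drop (PySem.Chars.findFrom text sub (k:Int) none).toNat ∧
    (∀ j : Nat, k ≤ j → j < (PySem.Chars.findFrom text sub (k:Int) none).toNat → ¬ sub <+: text.drop j) := by
  have hk : k ≤ text.length := by
    by_contra hk
    exact h (pvFindFrom_gt_len text sub k (by omega))
  obtain ⟨h1, h2, h3⟩ := PySem.Chars.findFrom_natCast_spec text sub k hk h
  refine ⟨h1, ?_, h2, h3⟩
  have := h2.length_le
  simp [List.length_drop, hsub] at this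
  omega

-- termination lemmas for the two ports (cited by name in decreasing_by)
theorem pvAloop_dec1 (text : List Char) (pos : Int) (i : Nat)
    (h1 : (i:Int) < pos)
    (h2 : PySem.Chars.slice text (some (i:Int)) (some ((i:Int)+2)) = ['/','*'])
    (h3 : ¬ PySem.Chars.findFrom text ['*','/'] ((i:Int)+2) none = -1) :
    pos.toNat - (PySem.Chars.findFrom text ['*','/'] ((i:Int)+2) none + 2).toNat < pos.toNat - i := by
  have hb := pvOpen_bound text i h2
  have hc : ((i:Int)+2) = ((i+2 : Nat) : Int) := by push_cast; ring
  rw [hc] at h3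
  have hf := (pvFind_facts text ['*','/'] rfl (i+2) h3).1
  rw [← hc] at hf
  omega

theorem pvAloop_dec2 (pos : Int) (i : Nat) (h1 : (i:Int) < pos) :
    pos.toNat - (i+1) < pos.toNat - i := by omega

theorem pvBspans_dec (text : List Char) (i : Nat)
    (hs : ¬ PySem.Chars.findFrom text ['/','*'] (i:Int) none = -1)
    (he : ¬ PySem.Chars.findFrom text ['*','/']
        (PySem.Chars.findFrom text ['/','*'] (i:Int) none + 2) none = -1) :
    text.length - ((PySem.Chars.findFrom text ['*','/']
        (PySem.Chars.findFrom text ['/','*'] (i:Int) none + 2) none).toNat + 2)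
      < text.length - i := by
  obtain ⟨hs1, hs2, -, -⟩ := pvFind_facts text ['/','*'] rfl i hs
  have hc : PySem.Chars.findFrom text ['/','*'] (i:Int) none + 2
      = (((PySem.Chars.findFrom text ['/','*'] (i:Int) none).toNat + 2 : Nat) : Int) := by
    omega
  rw [hc] at he ⊢
  have hf := pvFind_facts text ['*','/'] rfl _ he
  omega

-- ===== PORT A =====
-- A's while-loop over scan index i (a nonnegative int in A, carried as Nat; when the
-- closer is found, `end` ≥ 0, so `(… + 2).toNat` is Python's `end + 2`).
def pvAloop (text : List Char) (pos : Int) (i : Nat) : Bool :=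
  if h1 : (i:Int) < pos then
    if h2 : PySem.Chars.slice text (some (i:Int)) (some ((i:Int)+2)) = ['/','*'] then
      if h3 : PySem.Chars.findFrom text ['*','/'] ((i:Int)+2) none = -1 then true
      else if PySem.Chars.findFrom text ['*','/'] ((i:Int)+2) none ≥ pos then true
      else pvAloop text pos (PySem.Chars.findFrom text ['*','/'] ((i:Int)+2) none + 2).toNat
    else pvAloop text pos (i+1)
  else false
termination_by pos.toNat - i
decreasing_by
  · exact pvAloop_dec1 text pos i h1 h2 h3
  · exact pvAloop_dec2 pos i h1

def is_inside_block_comment_at_py (text : String) (pos : Int) : Bool :=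
  pvAloop text.toList pos 0

-- ===== PORT B =====
-- Source B's first loop: collect all closed spans (s, e) plus an optional unterminated tail.
def pvBspans (text : List Char) (i : Nat) : List (Nat × Nat) × Option Nat :=
  if PySem.Chars.findFrom text ['/','*'] (i:Int) none = -1 then ([], none)
  else if PySem.Chars.findFrom text ['*','/']
        (PySem.Chars.findFrom text ['/','*'] (i:Int) none + 2) none = -1 then
    ([], some (PySem.Chars.findFrom text ['/','*'] (i:Int) none).toNat)
  else
    ((((PySem.Chars.findFrom text ['/','*'] (i:Int) none).toNat,
       (PySem.Chars.findFrom text ['*','/']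
        (PySem.Chars.findFrom text ['/','*'] (i:Int) none + 2) none).toNat) ::
      (pvBspans text
        ((PySem.Chars.findFrom text ['*','/']
          (PySem.Chars.findFrom text ['/','*'] (i:Int) none + 2) none).toNat + 2)).1),
     (pvBspans text
        ((PySem.Chars.findFrom text ['*','/']
          (PySem.Chars.findFrom text ['/','*'] (i:Int) none + 2) none).toNat + 2)).2)
termination_by text.length - i
decreasing_by
  all_goals
  · rename_i hs he
    exact pvBspans_dec text i hs he

-- Source B's final containment test over the collected spans
def pvBcheck (r : List (Nat × Nat) × Option Nat) (pos : Int) : Bool :=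
  (match r.2 with
   | some t => decide ((t:Int) < pos)
   | none => false) ||
  r.1.any (fun se => decide ((se.1:Int) < pos) && decide (pos ≤ (se.2:Int)))

def is_inside_block_comment_at_py_alt (text : String) (pos : Int) : Bool :=
  pvBcheck (pvBspans text.toList 0) pos

-- ===== PRECONDITION & SPEC =====
def Spec_is_inside_block_comment_at_py (text : String) (pos : Int) (out : Bool) : Prop := out = is_inside_block_comment_at_py_alt text pos
instance (text : String) (pos : Int) (out : Bool) : Decidable (Spec_is_inside_block_comment_at_py text pos out) := by unfold Spec_is_inside_block_comment_at_py; infer_instance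

-- ===== CLAIM (what is proved, stated in full; the proofs are below) =====
def Claim_equal_is_inside_block_comment_at_py : Prop := ∀ (text : String) (pos : Int), Dom_is_inside_block_comment_at_py text pos → Spec_is_inside_block_comment_at_py text pos (is_inside_block_comment_at_py text pos)

-- ===== LEMMAS AND PROOFS =====

-- the slice test of A is exactly "'/*' is a prefix of text[i:]"
theorem pvOpen_prefix (l : List Char) (i : Nat) :
    PySem.Chars.slice l (some (i:Int)) (some ((i:Int)+2)) = ['/','*'] ↔ ['/','*'] <+: l.drop i := by
  rw [pvSliceTwo_eq, List.prefix_iff_eq_take]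
  exact ⟨fun h => h.symm, fun h => h.symm⟩

-- an infix of a later tail is an infix of an earlier one
theorem drop_succ_infix (l : List Char) (i : Nat) (x : List Char)
    (h : x <:+: l.drop (i+1)) : x <:+: l.drop i := by
  have h2 : l.drop (i+1) <:+ l.drop i := by
    have h3 := List.drop_suffix 1 (l.drop i)
    rwa [List.drop_drop] at h3
  exact h.trans h2.isInfix

-- A returns false when no opener occurs at or after i
theorem pvAloop_no_open (text : List Char) (pos : Int) :
    ∀ n i : Nat, pos.toNat - i = n → ¬ (['/','*'] <:+: text.drop i) →
      pvAloop text pos i = false := by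
  intro n
  induction n using Nat.strong_induction_on with
  | _ n IH =>
    intro i hn hno
    rw [pvAloop]
    by_cases h1 : (i:Int) < pos
    · rw [dif_pos h1]
      have h2 : ¬ PySem.Chars.slice text (some (i:Int)) (some ((i:Int)+2)) = ['/','*'] := by
        intro h2
        exact hno ((pvOpen_prefix text i).1 h2).isInfix
      rw [dif_neg h2]
      have hi : i < pos.toNat := by omega
      exact IH (pos.toNat - (i+1)) (by omega) (i+1) rfl
        (fun h => hno (drop_succ_infix text i _ h))
    · rw [dif_neg h1]

-- A walks from i up to the next opener position s (no opener strictly before s)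
theorem pvAloop_walk (text : List Char) (pos : Int) :
    ∀ n i s : Nat, s - i = n → i ≤ s →
      (∀ j : Nat, i ≤ j → j < s → ¬ ['/','*'] <+: text.drop j) →
      pvAloop text pos i = if (s:Int) < pos then pvAloop text pos s else false := by
  intro n
  induction n using Nat.strong_induction_on with
  | _ n IH =>
    intro i s hn his hno
    by_cases heq : i = s
    · subst heq
      by_cases hp : (i:Int) < pos
      · rw [if_pos hp]
      · rw [if_neg hp, pvAloop, dif_neg hp]
    · have hlt : i < s := by omega
      by_cases hp : (i:Int) < pos
      · rw [pvAloop, dif_pos hp]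
        have h2 : ¬ PySem.Chars.slice text (some (i:Int)) (some ((i:Int)+2)) = ['/','*'] := by
          intro h2
          exact hno i le_rfl hlt ((pvOpen_prefix text i).1 h2)
        rw [dif_neg h2]
        exact IH (s - (i+1)) (by omega) (i+1) s rfl (by omega)
          (fun j hj1 hj2 => hno j (by omega) hj2)
      · have hsp : ¬ ((s:Int) < pos) := by omega
        rw [if_neg hsp, pvAloop, dif_neg hp]

-- a span whose containment test fails drops out of B's check
theorem pvBcheck_cons (a : Nat × Nat) (r1 : List (Nat × Nat)) (r2 : Option Nat) (pos : Int)
    (h : (decide ((a.1:Int) < pos) && decide (pos ≤ (a.2:Int))) = false) :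
    pvBcheck ((a::r1, r2)) pos = pvBcheck ((r1, r2)) pos := by
  simp only [pvBcheck, List.any_cons, h, Bool.false_or]

-- B's check is false on spans collected from a start at or after pos
theorem pvBcheck_late (text : List Char) (pos : Int) :
    ∀ n i : Nat, text.length - i = n → pos ≤ (i:Int) →
      pvBcheck (pvBspans text i) pos = false := by
  intro n
  induction n using Nat.strong_induction_on with
  | _ n IH =>
    intro i hn hpi
    rw [pvBspans]
    by_cases hs : PySem.Chars.findFrom text ['/','*'] (i:Int) none = -1
    · rw [if_pos hs]; rfl
    · rw [if_neg hs]
      obtain ⟨hs1, hs2, -, -⟩ := pvFind_facts text ['/','*'] rfl i hs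
      by_cases he : PySem.Chars.findFrom text ['*','/']
          (PySem.Chars.findFrom text ['/','*'] (i:Int) none + 2) none = -1
      · rw [if_pos he]
        simp [pvBcheck]
        omega
      · rw [if_neg he]
        have hc : PySem.Chars.findFrom text ['/','*'] (i:Int) none + 2
            = (((PySem.Chars.findFrom text ['/','*'] (i:Int) none).toNat + 2 : Nat) : Int) := by omega
        rw [hc] at he
        obtain ⟨he1, he2, -, -⟩ := pvFind_facts text ['*','/'] rfl _ he
        rw [← hc] at he1 he2
        rw [pvBcheck_cons _ _ _ _ (by simp; omega)]
        exact IH _ (by omega) _ rfl (by omega)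

-- main invariant: A's interleaved scan from i equals B's check of the spans from i
theorem pvMain (text : List Char) (pos : Int) :
    ∀ n i : Nat, text.length - i = n →
      pvAloop text pos i = pvBcheck (pvBspans text i) pos := by
  intro n
  induction n using Nat.strong_induction_on with
  | _ n IH =>
    intro i hn
    rw [pvBspans]
    by_cases hs : PySem.Chars.findFrom text ['/','*'] (i:Int) none = -1
    · rw [if_pos hs]
      have hno : ¬ (['/','*'] <:+: text.drop i) := by
        by_cases hil : i ≤ text.length
        · exact (PySem.Chars.findFrom_natCast_eq_neg_one_iff text ['/','*'] i hil).1 hs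
        · rw [List.drop_eq_nil_of_le (by omega)]
          intro h; have := h.length_le; simp at this
      rw [pvAloop_no_open text pos _ i rfl hno]; rfl
    · rw [if_neg hs]
      obtain ⟨hs1, hs2, hs3, hs4⟩ := pvFind_facts text ['/','*'] rfl i hs
      set S := PySem.Chars.findFrom text ['/','*'] (i:Int) none with hS
      have hw := pvAloop_walk text pos _ i S.toNat rfl (by omega) (fun j hj1 hj2 => hs4 j hj1 hj2)
      rw [hw]
      have hc : S + 2 = ((S.toNat + 2 : Nat) : Int) := by omega
      by_cases hsp : ((S.toNat:Int) < pos)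
      · rw [if_pos hsp]
        rw [pvAloop, dif_pos hsp]
        have hsl : PySem.Chars.slice text (some (S.toNat:Int)) (some ((S.toNat:Int)+2)) = ['/','*'] :=
          (pvOpen_prefix text S.toNat).2 hs3
        rw [dif_pos hsl]
        have hstart : ((S.toNat:Int)) + 2 = S + 2 := by omega
        rw [hstart]
        by_cases he : PySem.Chars.findFrom text ['*','/'] (S + 2) none = -1
        · rw [dif_pos he, if_pos he]
          simp [pvBcheck]
          omega
        · rw [dif_neg he, if_neg he]
          set E := PySem.Chars.findFrom text ['*','/'] (S + 2) none with hE
          have he' : PySem.Chars.findFrom text ['*','/'] (((S.toNat + 2 : Nat)):Int) none ≠ -1 := by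
            rw [← hc]; exact he
          obtain ⟨he1, he2, -, -⟩ := pvFind_facts text ['*','/'] rfl (S.toNat+2) he'
          rw [← hc] at he1 he2
          by_cases hep : E ≥ pos
          · rw [if_pos hep]
            simp [pvBcheck, List.any_cons]
            refine Or.inr (Or.inl ?_)
            omega
          · rw [if_neg hep]
            have h2 : (E + 2).toNat = E.toNat + 2 := by omega
            rw [h2, IH (text.length - (E.toNat + 2)) (by omega) (E.toNat + 2) rfl]
            rw [pvBcheck_cons _ _ _ _ (by simp; omega)]
      · rw [if_neg hsp]
        by_cases he : PySem.Chars.findFrom text ['*','/'] (S + 2) none = -1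
        · rw [if_pos he]
          simp [pvBcheck]
          omega
        · rw [if_neg he]
          have he' : PySem.Chars.findFrom text ['*','/'] (((S.toNat + 2 : Nat)):Int) none ≠ -1 := by
            rw [← hc]; exact he
          obtain ⟨he1, he2, -, -⟩ := pvFind_facts text ['*','/'] rfl (S.toNat+2) he'
          rw [← hc] at he1 he2
          rw [pvBcheck_cons _ _ _ _ (by simp; omega)]
          exact (pvBcheck_late text pos _ _ rfl (by omega)).symm

-- ===== VERDICT (by name: the statement is the Claim_ definition above) =====
theorem is_inside_block_comment_at_py_spec : Claim_equal_is_inside_block_comment_at_py := by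
  intro text pos _
  unfold Spec_is_inside_block_comment_at_py is_inside_block_comment_at_py is_inside_block_comment_at_py_alt
  exact pvMain text.toList pos _ 0 rfl
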